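-- pv_equiv track=rewrite | github.com/EliasAroni2000/automatas | Aroni-tp1-v2.py | tokenMenorIgual
-- ===== SOURCE A (Python) =====
-- estado_final = "estado final"
--
-- estadoNoFinal = "estado no aceptado"
--
-- estadoTrampa = "estado trampa"
--
-- def tokenMenorIgual(lexema):
--     estado = 0
--     estadoFinal = [2]
--     caracter = {0:{'<':1},1:{'=':2},2:{}}
--     for c in lexema:
--         if c in caracter[estado]:
--             estado = caracter[estado][c]
--         else:
--             estado = -1
--             break
--     if estado == -1:
--         return estadoTrampa
--     if estado in estadoFinal:
--         return estado_final
--     else: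
--         return estadoNoFinal
-- ===== SOURCE B (Python) =====
-- estado_final = "estado final"
-- estadoNoFinal = "estado no aceptado"
-- estadoTrampa = "estado trampa"
--
-- def tokenMenorIgual(lexema):
--     chars = list(lexema)
--     if chars == ['<', '=']:
--         return estado_final
--     if chars == [] or chars == ['<']:
--         return estadoNoFinal
--     return estadoTrampa
-- ===== Notes on version B (the rewrite author's own statement) =====
-- stated objective: simpler
-- what changed: Replaced the table-driven DFA loop (transition dict, stateful scan with early break, final-state membership test) by materializing the characters once and classifying by direct comparison against the three possible accepted/partial prefixes.
import Mathlib
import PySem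

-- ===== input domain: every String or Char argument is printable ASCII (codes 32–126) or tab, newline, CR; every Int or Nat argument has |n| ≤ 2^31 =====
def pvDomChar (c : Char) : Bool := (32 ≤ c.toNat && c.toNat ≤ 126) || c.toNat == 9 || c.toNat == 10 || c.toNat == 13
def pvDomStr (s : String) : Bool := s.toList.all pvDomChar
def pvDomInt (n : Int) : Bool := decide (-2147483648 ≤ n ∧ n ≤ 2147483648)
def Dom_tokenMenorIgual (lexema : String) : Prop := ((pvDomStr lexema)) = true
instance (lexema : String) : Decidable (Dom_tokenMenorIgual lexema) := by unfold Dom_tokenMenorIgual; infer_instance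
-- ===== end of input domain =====

-- B replaces A's table-driven DFA scan with a build-then-compare classification (objective: simpler).

-- ===== PORT A =====
-- transition table: caracter = {0:{'<':1},1:{'=':2},2:{}}
def tmiTable : PySem.Dict Int (PySem.Dict Char Int) :=
  PySem.Dict.mk [(0, PySem.Dict.mk [('<', 1)]), (1, PySem.Dict.mk [('=', 2)]), (2, PySem.Dict.mk [])]

-- the for-loop with its early 'break' (estado = -1); 'caracter[estado]' is total on the
-- reachable states 0/1/2, so the .getD [] default is never used
def tmiLoop (estado : Int) (cs : List Char) : Int :=
  match cs with
  | [] => estado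
  | c :: rest =>
    match PySem.Dict.get? ((PySem.Dict.get? tmiTable estado).getD (PySem.Dict.mk [])) c with
    | some s => tmiLoop s rest
    | none => -1

def tokenMenorIgual (lexema : String) : String :=
  let estado := tmiLoop 0 lexema.toList
  if estado = -1 then "estado trampa"
  else if estado ∈ [(2 : Int)] then "estado final"
  else "estado no aceptado"

-- ===== PORT B =====
def tokenMenorIgual_alt (lexema : String) : String :=
  let chars := lexema.toList
  if chars = ['<', '='] then "estado final"
  else if chars = [] ∨ chars = ['<'] then "estado no aceptado"
  else "estado trampa"

-- ===== PRECONDITION & SPEC =====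
def Spec_tokenMenorIgual (lexema : String) (out : String) : Prop := out = tokenMenorIgual_alt lexema
instance (lexema : String) (out : String) : Decidable (Spec_tokenMenorIgual lexema out) := by unfold Spec_tokenMenorIgual; infer_instance

-- ===== CLAIM (what is proved, stated in full; the proofs are below) =====
def Claim_equal_tokenMenorIgual : Prop := ∀ (lexema : String), Dom_tokenMenorIgual lexema → Spec_tokenMenorIgual lexema (tokenMenorIgual lexema)

-- ===== LEMMAS AND PROOFS =====

theorem tmi_lists (cs : List Char) :
    (let estado := tmiLoop 0 cs
     if estado = -1 then "estado trampa"
     else if estado ∈ [(2 : Int)] then "estado final"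
     else "estado no aceptado") =
    (if cs = ['<', '='] then "estado final"
     else if cs = [] ∨ cs = ['<'] then "estado no aceptado"
     else "estado trampa") := by
  match cs with
  | [] => simp [tmiLoop]
  | [c] =>
    by_cases h : c = '<'
    · subst h; decide
    · simp [tmiLoop, tmiTable, PySem.Dict.get?, h, Ne.symm h]
  | c :: c2 :: rest =>
    by_cases h : c = '<'
    · subst h
      by_cases h2 : c2 = '='
      · subst h2
        cases rest with
        | nil => decide
        | cons d t => simp [tmiLoop, tmiTable, PySem.Dict.get?]
      · simp [tmiLoop, tmiTable, PySem.Dict.get?, h2, Ne.symm h2]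
    · simp [tmiLoop, tmiTable, PySem.Dict.get?, h, Ne.symm h]

-- ===== VERDICT (by name: the statement is the Claim_ definition above) =====
theorem tokenMenorIgual_spec : Claim_equal_tokenMenorIgual := by
  intro lexema _
  unfold Spec_tokenMenorIgual tokenMenorIgual tokenMenorIgual_alt
  exact tmi_lists lexema.toList
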